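-- pv_equiv track=rewrite | github.com/princessupload/lotto-news | CRITICAL_TICKET_AUDIT.py | calculate_pair_score
-- ===== SOURCE A (Python) =====
-- from collections import Counter, defaultdict
-- from itertools import combinations
--
-- def calculate_pair_score(ticket_main, draws):
--     """Calculate how well ticket uses frequent pairs."""
--     pair_counter = Counter()
--     for draw in draws:
--         main = draw.get('main', [])
--         for pair in combinations(sorted(main), 2):
--             pair_counter[pair] += 1
--
--     score = 0
--     ticket_pairs = list(combinations(sorted(ticket_main), 2))
--     for pair in ticket_pairs:
--         score += pair_counter.get(pair, 0)
--
--     return score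
-- ===== SOURCE B (Python) =====
-- from collections import Counter
--
-- def calculate_pair_score(ticket_main, draws):
--     """Calculate how well ticket uses frequent pairs."""
--     ticket_counts = Counter(ticket_main)
--     score = 0
--     for draw in draws:
--         draw_counts = Counter(n for n in draw.get('main', []) if n in ticket_counts)
--         u = [ticket_counts[a] * draw_counts[a] for a in draw_counts]
--         s1 = sum(u)
--         s2 = sum(x * x for x in u)
--         score += (s1 * s1 - s2) // 2
--         score += sum((ticket_counts[a] * (ticket_counts[a] - 1) // 2)
--                      * (draw_counts[a] * (draw_counts[a] - 1) // 2)
--                      for a in draw_counts)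
--     return score
-- ===== Notes on version B (the rewrite author's own statement) =====
-- stated objective: faster
-- what changed: B never enumerates pairs: it counts multiplicities (Counter of the ticket, per-draw Counter of ticket-relevant numbers) and computes each draw's pair-frequency contribution in closed form from those counts ((s1^2-s2)/2 cross terms plus C(t,2)*C(c,2) diagonal terms), instead of A's Counter over all O(m^2) pairs of every draw queried by all O(k^2) ticket pairs.
import Mathlib
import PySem

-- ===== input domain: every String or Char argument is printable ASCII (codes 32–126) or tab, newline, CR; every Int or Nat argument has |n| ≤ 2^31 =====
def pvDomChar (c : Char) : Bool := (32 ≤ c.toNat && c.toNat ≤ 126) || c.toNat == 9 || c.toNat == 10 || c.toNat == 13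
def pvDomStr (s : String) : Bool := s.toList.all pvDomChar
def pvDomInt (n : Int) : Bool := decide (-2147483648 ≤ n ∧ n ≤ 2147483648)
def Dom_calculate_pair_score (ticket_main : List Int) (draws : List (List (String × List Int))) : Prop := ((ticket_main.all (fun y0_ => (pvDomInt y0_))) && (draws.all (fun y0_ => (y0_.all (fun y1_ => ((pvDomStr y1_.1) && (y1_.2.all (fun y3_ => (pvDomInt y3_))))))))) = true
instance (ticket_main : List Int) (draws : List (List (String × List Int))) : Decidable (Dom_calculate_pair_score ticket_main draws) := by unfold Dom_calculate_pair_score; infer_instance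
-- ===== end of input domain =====

-- B replaces A's pair enumeration (a Counter over all pairs of every draw, queried by every
-- ticket pair) with multiplicity counting: per draw it counts ticket-relevant numbers and
-- combines the counts in closed form, never materialising any pair (objective: faster).

-- itertools.combinations(l, 2) as a list of pairs (hand port, exact: CPython's index-lexicographic order)
def combos2 (l : List Int) : List (Int × Int) :=
  match l with
  | [] => []
  | x :: xs => xs.map (fun y => (x, y)) ++ combos2 xs

-- ===== PORT A =====
def calculate_pair_score (ticket_main : List Int) (draws : List (List (String × List Int))) : Int :=
  -- pair_counter = Counter(); for draw in draws: for pair in combinations(sorted(draw.get('main', [])), 2): pair_counter[pair] += 1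
  let pair_counter : PySem.Dict (Int × Int) Int :=
    draws.foldl (fun d draw =>
      (combos2 (PySem.List.sorted (PySem.Dict.getD (PySem.Dict.ofList draw) "main" []) (fun x => x) false)).foldl
        (fun d p => d.modify p 0 (· + 1)) d) PySem.Dict.empty
  -- score = 0; for pair in list(combinations(sorted(ticket_main), 2)): score += pair_counter.get(pair, 0)
  let ticket_pairs := combos2 (PySem.List.sorted ticket_main (fun x => x) false)
  ticket_pairs.foldl (fun score p => score + pair_counter.getD p 0) 0

-- ===== PORT B =====
def calculate_pair_score_alt (ticket_main : List Int) (draws : List (List (String × List Int))) : Int :=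
  -- ticket_counts = Counter(ticket_main)
  let ticket_counts : PySem.Dict Int Int := PySem.Dict.counter ticket_main
  -- for draw in draws: … score += (s1*s1 - s2)//2; score += sum(…)
  draws.foldl (fun score draw =>
    let draw_counts : PySem.Dict Int Int := PySem.Dict.counter
      ((PySem.Dict.getD (PySem.Dict.ofList draw) "main" []).filter (fun n => ticket_counts.contains n))
    let u := draw_counts.keys.map (fun a => ticket_counts.getD a 0 * draw_counts.getD a 0)
    let s1 := u.sum
    let s2 := (u.map (fun x => x * x)).sum
    score + PySem.Int.floordiv (s1 * s1 - s2) 2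
      + (draw_counts.keys.map (fun a =>
          PySem.Int.floordiv (ticket_counts.getD a 0 * (ticket_counts.getD a 0 - 1)) 2
          * PySem.Int.floordiv (draw_counts.getD a 0 * (draw_counts.getD a 0 - 1)) 2)).sum) 0

-- ===== PRECONDITION & SPEC =====
def Spec_calculate_pair_score (ticket_main : List Int) (draws : List (List (String × List Int))) (out : Int) : Prop := out = calculate_pair_score_alt ticket_main draws
instance (ticket_main : List Int) (draws : List (List (String × List Int))) (out : Int) : Decidable (Spec_calculate_pair_score ticket_main draws out) := by unfold Spec_calculate_pair_score; infer_instance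

-- ===== CLAIM (what is proved, stated in full; the proofs are below) =====
def Claim_equal_calculate_pair_score : Prop := ∀ (ticket_main : List Int) (draws : List (List (String × List Int))), Dom_calculate_pair_score ticket_main draws → Spec_calculate_pair_score ticket_main draws (calculate_pair_score ticket_main draws)

-- ===== LEMMAS AND PROOFS =====

-- n choose 2, recursively
def ch2 : Nat → Nat
  | 0 => 0
  | n + 1 => ch2 n + n

-- sum of products over all index pairs i < j
def pairsum : List Int → Int
  | [] => 0
  | x :: xs => x * xs.sum + pairsum xs

-- the value of a ticket-pair count as a function of the pair, given per-value functions
def GG (f g : Int → Int) (q : Int × Int) : Int :=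
  if q.1 < q.2 then f q.1 * f q.2 else if q.1 = q.2 then g q.1 else 0

-- the counter built by A's nested modify loop counts occurrences in the concatenation
theorem getD_nested_counter (draws : List (List (String × List Int))) (d : PySem.Dict (Int × Int) Int) (p : Int × Int) :
    (draws.foldl (fun d draw =>
      (combos2 (PySem.List.sorted (PySem.Dict.getD (PySem.Dict.ofList draw) "main" []) (fun x => x) false)).foldl
        (fun d p => d.modify p 0 (· + 1)) d) d).getD p 0
    = d.getD p 0 + ((draws.flatMap (fun draw => combos2 (PySem.List.sorted (PySem.Dict.getD (PySem.Dict.ofList draw) "main" []) (fun x => x) false))).count p : Int) := by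
  induction draws generalizing d with
  | nil => simp
  | cons dr drs ih =>
      simp only [List.foldl_cons, List.flatMap_cons, List.count_append]
      rw [ih, PySem.Dict.getD_foldl_modify_add_one]
      push_cast
      ring

-- pointwise sums split
theorem sum_map_add (L : List (Int × Int)) (f g : Int × Int → Int) :
    (L.map (fun q => f q + g q)).sum = (L.map f).sum + (L.map g).sum := by
  induction L with
  | nil => simp
  | cons a L ih => simp only [List.map_cons, List.sum_cons, ih]; ring

-- summing an indicator recovers the count
theorem sum_map_ite (L : List (Int × Int)) (p : Int × Int) :
    (L.map (fun q => if q = p then (1 : Int) else 0)).sum = (L.count p : Int) := by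
  induction L with
  | nil => simp
  | cons a L ih =>
      simp only [List.map_cons, List.sum_cons, List.count_cons, ih]
      by_cases h : a = p
      · simp [h]; ring
      · simp [h]

-- summing counts of P over L = summing counts of L over P
theorem sum_count_comm (P L : List (Int × Int)) :
    (P.map (fun p => (L.count p : Int))).sum = (L.map (fun q => (P.count q : Int))).sum := by
  induction P with
  | nil => simp
  | cons p P ih =>
      simp only [List.map_cons, List.sum_cons]
      rw [ih]
      have expand : (L.map (fun q => ((p :: P).count q : Int)))
          = L.map (fun q => (P.count q : Int) + (if q = p then (1 : Int) else 0)) := by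
        apply List.map_congr_left
        intro q _
        rw [List.count_cons]
        by_cases h : q = p
        · simp [h]
        · have h' : ¬ p = q := fun hh => h hh.symm
          simp [h, h']
      rw [expand, sum_map_add, sum_map_ite]
      ring

-- sum over a flatMap is the sum of the per-block sums
theorem sum_flatMap {α β : Type} (M : α → List β) (f : β → Int) (l : List α) :
    ((l.flatMap M).map f).sum = (l.map (fun a => ((M a).map f).sum)).sum := by
  induction l with
  | nil => simp
  | cons a l ih => simp [ih]

-- dropping elements on which f vanishes does not change the sum
theorem sum_filter_zero {β : Type} (c : β → Bool) (f : β → Int) (M : List β)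
    (h : ∀ q ∈ M, c q = false → f q = 0) :
    ((M.filter c).map f).sum = (M.map f).sum := by
  induction M with
  | nil => simp
  | cons a M ih =>
      have ih' := ih (fun q hq => h q (List.mem_cons_of_mem _ hq))
      by_cases ha : c a = true
      · simp [ha, ih']
      · have := h a List.mem_cons_self (by simpa using ha)
        simp [ha, ih', this]

-- combinations of a filtered list are the filtered combinations
theorem combos2_filter (pr : Int → Bool) (l : List Int) :
    combos2 (l.filter pr) = (combos2 l).filter (fun q => pr q.1 && pr q.2) := by
  induction l with
  | nil => simp [combos2]
  | cons x xs ih =>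
      by_cases hx : pr x = true
      · simp only [List.filter_cons, hx, if_pos, combos2, ih, List.filter_append]
        congr 1
        rw [List.filter_map]
        simp [hx, Function.comp_def]
      · simp only [List.filter_cons, hx, Bool.false_eq_true, if_false, combos2,
          List.filter_append, List.filter_map]
        simp [hx, Function.comp_def, ih]

-- counting a fixed-first-component pair in a mapped list
theorem count_map_pair (x a b : Int) (xs : List Int) :
    (xs.map (fun y => (x, y))).count (a, b) = if x = a then xs.count b else 0 := by
  induction xs with
  | nil => simp
  | cons y ys ih =>
      simp only [List.map_cons, List.count_cons, ih, beq_iff_eq, Prod.mk.injEq]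
      by_cases hx : x = a
      · subst hx
        by_cases hy : b = y <;> simp [hy]
      · have h' : ¬ a = x := fun hh => hx hh.symm
        simp [hx, h']

-- elements smaller than the head of a sorted list do not occur in the tail
theorem count_tail_zero_of_lt {x : Int} {xs : List Int} (hrel : ∀ z ∈ xs, x ≤ z)
    {y : Int} (hy : y < x) : xs.count y = 0 := by
  rw [List.count_eq_zero]
  intro hmem
  exact absurd (hrel y hmem) (not_le.mpr hy)

-- the count of a pair among the sorted combinations, in closed form
theorem count_combos2_sorted (S : List Int) (h : S.Pairwise (· ≤ ·)) (a b : Int) :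
    (combos2 S).count (a, b)
      = if a < b then S.count a * S.count b else if a = b then ch2 (S.count a) else 0 := by
  induction S with
  | nil => simp [combos2, ch2]
  | cons x xs ih =>
      rw [List.pairwise_cons] at h
      have ih' := ih h.2
      simp only [combos2, List.count_append, count_map_pair, ih', List.count_cons, beq_iff_eq]
      by_cases hab : a < b
      · have hne : a ≠ b := by omega
        simp only [hab, if_pos, hne, if_neg]
        by_cases hx : x = a
        · subst hx
          have h1 : ¬ b = x := by omega
          have h2 : ¬ x = b := by omega
          simp [h1, h2]
          ring
        · have hax : ¬ a = x := fun hh => hx hh.symm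
          by_cases hxb : x = b
          · subst hxb
            have hca : xs.count a = 0 := count_tail_zero_of_lt h.1 hab
            simp [hx, hax, hca]
          · have hbx : ¬ b = x := fun hh => hxb hh.symm
            simp [hx, hax, hbx, hxb]
      · by_cases heq : a = b
        · subst heq
          simp only [lt_irrefl, if_neg, if_pos rfl, ite_self, if_true, eq_self_iff_true, hab,
            Bool.false_eq_true]
          by_cases hx : x = a
          · subst hx
            simp [ch2] <;> omega
          · have hax : ¬ a = x := fun hh => hx hh.symm
            simp [hx, hax]
        · have hba : b < a := by omega
          simp only [hab, if_neg, heq, Bool.false_eq_true]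
          by_cases hx : x = a
          · subst hx
            have hcb : xs.count b = 0 := count_tail_zero_of_lt h.1 hba
            simp [hcb, hab, heq]
          · have hax : ¬ a = x := fun hh => hx hh.symm
            simp [hx, hax, hab, heq]

-- basic algebra of pairsum
theorem two_pairsum (u : List Int) :
    u.sum * u.sum - (u.map (fun x => x * x)).sum = 2 * pairsum u := by
  induction u with
  | nil => simp [pairsum]
  | cons x xs ih =>
      simp only [List.sum_cons, List.map_cons, pairsum]
      nlinarith [ih]

theorem pairsum_perm {u v : List Int} (h : u.Perm v) : pairsum u = pairsum v := by
  have e1 := two_pairsum u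
  have e2 := two_pairsum v
  rw [h.sum_eq, (h.map (fun x => x * x)).sum_eq] at e1
  linarith

theorem sum_map_replicate {α : Type} (n : Nat) (a : α) (f : α → Int) :
    ((List.replicate n a).map f).sum = (n : Int) * f a := by
  induction n with
  | zero => simp
  | succ n ih => simp only [List.replicate_succ, List.map_cons, List.sum_cons, ih]; push_cast; ring

theorem sum_combos2_append (xs ys : List Int) (F : Int × Int → Int) :
    ((combos2 (xs ++ ys)).map F).sum
      = ((combos2 xs).map F).sum + ((combos2 ys).map F).sum
        + (xs.map (fun x => (ys.map (fun y => F (x, y))).sum)).sum := by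
  induction xs with
  | nil => simp [combos2]
  | cons x xs ih =>
      simp only [List.cons_append, combos2, List.map_append, List.sum_append, List.map_map,
        Function.comp_def, ih, List.map_cons, List.sum_cons]
      ring

theorem sum_combos2_replicate (n : Nat) (a : Int) (F : Int × Int → Int) :
    ((combos2 (List.replicate n a)).map F).sum = (ch2 n : Int) * F (a, a) := by
  induction n with
  | zero => simp [combos2, ch2]
  | succ n ih =>
      simp only [List.replicate_succ, combos2, List.map_append, List.sum_append, List.map_map,
        Function.comp_def, ih]
      rw [sum_map_replicate]
      have : (ch2 (n + 1) : Int) = ch2 n + n := by simp [ch2]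
      rw [this]; ring

theorem count_flatMap_replicate (D : List Int) (nn : Int → Nat) (hD : D.Nodup) (v : Int) :
    (D.flatMap (fun a => List.replicate (nn a) a)).count v = if v ∈ D then nn v else 0 := by
  induction D with
  | nil => simp
  | cons a D' ih =>
      rw [List.nodup_cons] at hD
      have ih' := ih hD.2
      simp only [List.flatMap_cons, List.count_append, ih', List.count_replicate, List.mem_cons]
      by_cases hv : v = a
      · subst hv; simp [hD.1]
      · simp only [hv, if_false, Bool.false_eq_true, or_iff_right hv]
        have hv' : ¬ a = v := fun hh => hv hh.symm
        simp [hv, hv']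

theorem pairwise_le_flatMap (D : List Int) (nn : Int → Nat) (hD : D.Pairwise (· < ·)) :
    (D.flatMap (fun a => List.replicate (nn a) a)).Pairwise (· ≤ ·) := by
  induction D with
  | nil => simp
  | cons a D' ih =>
      rw [List.pairwise_cons] at hD
      simp only [List.flatMap_cons]
      rw [List.pairwise_append]
      refine ⟨List.pairwise_replicate.mpr (Or.inr le_rfl), ih hD.2, ?_⟩
      intro x hx y hy
      rw [List.eq_of_mem_replicate hx]
      rcases List.mem_flatMap.mp hy with ⟨b, hb, hyb⟩
      rw [List.eq_of_mem_replicate hyb]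
      exact le_of_lt (hD.1 b hb)

theorem ofList_sublist (xs : List Int) : (PySem.Set.ofList xs).Sublist xs := by
  induction xs using List.reverseRecOn with
  | nil => simp
  | append_singleton xs x ih =>
      rw [PySem.Set.ofList_append_singleton]
      by_cases h : PySem.Set.contains (PySem.Set.ofList xs) x = true
      · simp only [PySem.Set.add, h, if_pos]
        exact ih.trans (List.sublist_append_left xs [x])
      · simp only [PySem.Set.add, h, Bool.false_eq_true, if_false]
        exact List.Sublist.append ih (List.Sublist.refl [x])

theorem pairwise_lt_ofList (W : List Int) (h : W.Pairwise (· ≤ ·)) :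
    (PySem.Set.ofList W).Pairwise (· < ·) := by
  have h1 : (PySem.Set.ofList W).Pairwise (· ≤ ·) := h.sublist (ofList_sublist W)
  have h2 : (PySem.Set.ofList W).Pairwise (· ≠ ·) := PySem.Set.nodup_ofList W
  exact (h1.and h2).imp (fun hab => lt_of_le_of_ne hab.1 hab.2)

-- a sorted list is the concatenation of runs of its distinct values
theorem canon (W : List Int) (h : W.Pairwise (· ≤ ·)) :
    W = (PySem.Set.ofList W).flatMap (fun a => List.replicate (W.count a) a) := by
  have hnd : (PySem.Set.ofList W).Nodup := PySem.Set.nodup_ofList W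
  have hperm : W.Perm ((PySem.Set.ofList W).flatMap fun a => List.replicate (W.count a) a) := by
    rw [List.perm_iff_count]
    intro v
    rw [count_flatMap_replicate _ _ hnd v]
    by_cases hv : v ∈ W
    · simp [PySem.Set.mem_ofList, hv]
    · simp [PySem.Set.mem_ofList, hv, List.count_eq_zero_of_not_mem hv]
  exact hperm.eq_of_pairwise (fun a b _ _ hab hba => le_antisymm hab hba) h
    (pairwise_le_flatMap _ _ (pairwise_lt_ofList W h))

theorem sum_map_pull (D : List Int) (k : Int) (w : Int → Int) (nn : Int → Nat) :
    (D.map (fun b => (nn b : Int) * (k * w b))).sum = k * (D.map (fun b => w b * (nn b : Int))).sum := by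
  induction D with
  | nil => simp
  | cons c cs ih => simp only [List.map_cons, List.sum_cons, ih]; ring

-- the closed form of the GG-sum over a run decomposition
theorem sum_combos2_blocks (D : List Int) (nn : Int → Nat) (f g : Int → Int)
    (hD : D.Pairwise (· < ·)) :
    ((combos2 (D.flatMap (fun a => List.replicate (nn a) a))).map (GG f g)).sum
      = pairsum (D.map (fun a => f a * (nn a : Int)))
        + (D.map (fun a => g a * (ch2 (nn a) : Int))).sum := by
  induction D with
  | nil => simp [combos2, pairsum]
  | cons a D' ih =>
      rw [List.pairwise_cons] at hD
      simp only [List.flatMap_cons]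
      rw [sum_combos2_append, ih hD.2, sum_combos2_replicate, sum_map_replicate]
      have hGaa : GG f g (a, a) = g a := by simp [GG]
      have hcross : ((D'.flatMap fun b => List.replicate (nn b) b).map (fun y => GG f g (a, y))).sum
          = (D'.map (fun b => (nn b : Int) * (f a * f b))).sum := by
        rw [sum_flatMap]
        apply congrArg List.sum
        apply List.map_congr_left
        intro b hb
        rw [sum_map_replicate]
        have hab : GG f g (a, b) = f a * f b := by simp [GG, hD.1 b hb]
        rw [hab]
      rw [hGaa, hcross, sum_map_pull]
      simp only [List.map_cons, pairsum, List.sum_cons]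
      ring

-- floor division facts
theorem fd_two_mul (k : Int) : PySem.Int.floordiv (2 * k) 2 = k := by
  rw [PySem.Int.floordiv_eq_ediv_of_pos (by norm_num)]
  exact Int.mul_ediv_cancel_left k (by norm_num)

theorem fd_ch2 (n : Nat) : PySem.Int.floordiv ((n : Int) * ((n : Int) - 1)) 2 = (ch2 n : Int) := by
  induction n with
  | zero => rw [PySem.Int.floordiv_eq_ediv_of_pos (by norm_num)]; simp [ch2]
  | succ n ih =>
      have h : ((n + 1 : Nat) : Int) * (((n + 1 : Nat) : Int) - 1)
          = (n : Int) * ((n : Int) - 1) + (n : Int) * 2 := by push_cast; ring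
      rw [h, PySem.Int.floordiv_eq_ediv_of_pos (by norm_num),
        Int.add_mul_ediv_right _ _ (by norm_num : (2 : Int) ≠ 0)]
      rw [PySem.Int.floordiv_eq_ediv_of_pos (by norm_num)] at ih
      rw [ih]
      have h2 : (ch2 (n + 1) : Int) = ch2 n + n := by simp [ch2]
      rw [h2]

-- generic foldl-accumulates-a-sum lemma
theorem foldl_add_sum {α : Type} (l : List α) (f : α → Int) (s : Int) :
    l.foldl (fun acc a => acc + f a) s = s + (l.map f).sum := by
  induction l generalizing s with
  | nil => simp
  | cons x xs ih => simp [ih, add_assoc]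

-- the ticket-pair counter, pointwise, as a GG function of the value counts
theorem ticket_pair_count (tk : List Int) (q : Int × Int) :
    ((combos2 (PySem.List.sorted tk (fun x => x) false)).count q : Int)
      = GG (fun a => (tk.count a : Int)) (fun a => (ch2 (tk.count a) : Int)) q := by
  obtain ⟨a, b⟩ := q
  have hs : (PySem.List.sorted tk (fun x => x) false).Pairwise (· ≤ ·) :=
    PySem.List.sorted_pairwise tk (fun x => x)
  rw [count_combos2_sorted _ hs a b]
  have hc : ∀ v, (PySem.List.sorted tk (fun x => x) false).count v = tk.count v :=
    fun v => (PySem.List.sorted_perm tk (fun x => x) false).count_eq v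
  rw [hc a, hc b]
  simp only [GG]
  split_ifs <;> push_cast <;> ring

theorem GG_zero_of_notmem (tk : List Int) (q : Int × Int) (h : q.1 ∉ tk ∨ q.2 ∉ tk) :
    GG (fun a => (tk.count a : Int)) (fun a => (ch2 (tk.count a) : Int)) q = 0 := by
  simp only [GG]
  split_ifs with h1 h2
  · rcases h with h | h <;> rw [List.count_eq_zero_of_not_mem h] <;> simp
  · have hq : q.1 ∉ tk := by
      rcases h with h | h
      · exact h
      · rw [h2]; exact h
    rw [List.count_eq_zero_of_not_mem hq]
    simp [ch2]
  · rfl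

-- per-draw: A's sum of ticket-pair counts over the draw's sorted pairs equals B's closed form
theorem draw_eq (tk mn : List Int) :
    ((combos2 (PySem.List.sorted mn (fun x => x) false)).map
        (fun q => ((combos2 (PySem.List.sorted tk (fun x => x) false)).count q : Int))).sum
      = PySem.Int.floordiv (((PySem.Dict.counter (mn.filter (fun n => (PySem.Dict.counter tk).contains n))).keys.map (fun a => (PySem.Dict.counter tk).getD a 0 * (PySem.Dict.counter (mn.filter (fun n => (PySem.Dict.counter tk).contains n))).getD a 0)).sum * ((PySem.Dict.counter (mn.filter (fun n => (PySem.Dict.counter tk).contains n))).keys.map (fun a => (PySem.Dict.counter tk).getD a 0 * (PySem.Dict.counter (mn.filter (fun n => (PySem.Dict.counter tk).contains n))).getD a 0)).sum - (((PySem.Dict.counter (mn.filter (fun n => (PySem.Dict.counter tk).contains n))).keys.map (fun a => (PySem.Dict.counter tk).getD a 0 * (PySem.Dict.counter (mn.filter (fun n => (PySem.Dict.counter tk).contains n))).getD a 0)).map (fun x => x * x)).sum) 2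
        + ((PySem.Dict.counter (mn.filter (fun n => (PySem.Dict.counter tk).contains n))).keys.map (fun a => PySem.Int.floordiv ((PySem.Dict.counter tk).getD a 0 * ((PySem.Dict.counter tk).getD a 0 - 1)) 2 * PySem.Int.floordiv ((PySem.Dict.counter (mn.filter (fun n => (PySem.Dict.counter tk).contains n))).getD a 0 * ((PySem.Dict.counter (mn.filter (fun n => (PySem.Dict.counter tk).contains n))).getD a 0 - 1)) 2)).sum := by
  have hmemp : ∀ n : Int, ((PySem.Dict.counter tk).contains n = true) ↔ n ∈ tk := by
    intro n
    rw [PySem.Dict.contains_counter]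
    simp
  -- A side: replace counts by GG, restrict to ticket members, decompose into runs
  rw [show (combos2 (PySem.List.sorted mn (fun x => x) false)).map
        (fun q => ((combos2 (PySem.List.sorted tk (fun x => x) false)).count q : Int))
      = (combos2 (PySem.List.sorted mn (fun x => x) false)).map
        (GG (fun a => (tk.count a : Int)) (fun a => (ch2 (tk.count a) : Int)))
    from List.map_congr_left (fun q _ => ticket_pair_count tk q)]
  rw [← sum_filter_zero (fun q => (PySem.Dict.counter tk).contains q.1 && (PySem.Dict.counter tk).contains q.2)
        _ _ (by
          intro q _ hq
          apply GG_zero_of_notmem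
          rcases Bool.and_eq_false_iff.mp hq with h | h
          · exact Or.inl (fun hmem => by rw [(hmemp q.1).mpr hmem] at h; cases h)
          · exact Or.inr (fun hmem => by rw [(hmemp q.2).mpr hmem] at h; cases h)),
      ← combos2_filter]
  have hS : ((PySem.List.sorted mn (fun x => x) false).filter
      (fun n => (PySem.Dict.counter tk).contains n)).Pairwise (· ≤ ·) :=
    (PySem.List.sorted_pairwise mn (fun x => x)).filter _
  rw [canon _ hS, sum_combos2_blocks _ _ _ _ (pairwise_lt_ofList _ hS)]
  -- B side: counter lookups are counts, floordivs are pairsum/ch2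
  simp only [PySem.Dict.keys_counter, PySem.Dict.getD_counter]
  rw [two_pairsum, fd_two_mul]
  simp only [fd_ch2]
  -- transfer from the sorted-filtered list to the filtered list (a permutation)
  have hWR : ((PySem.List.sorted mn (fun x => x) false).filter
        (fun n => (PySem.Dict.counter tk).contains n)).Perm
      (mn.filter (fun n => (PySem.Dict.counter tk).contains n)) :=
    (PySem.List.sorted_perm mn (fun x => x) false).filter _
  have hcnt : ∀ a : Int, ((PySem.List.sorted mn (fun x => x) false).filter
        (fun n => (PySem.Dict.counter tk).contains n)).count a
      = (mn.filter (fun n => (PySem.Dict.counter tk).contains n)).count a :=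
    fun a => hWR.count_eq a
  have hKD : (PySem.Set.ofList ((PySem.List.sorted mn (fun x => x) false).filter
        (fun n => (PySem.Dict.counter tk).contains n))).Perm
      (PySem.Set.ofList (mn.filter (fun n => (PySem.Dict.counter tk).contains n))) := by
    rw [List.perm_ext_iff_of_nodup (PySem.Set.nodup_ofList _) (PySem.Set.nodup_ofList _)]
    intro a
    rw [PySem.Set.mem_ofList, PySem.Set.mem_ofList]
    exact hWR.mem_iff
  simp only [hcnt]
  exact congrArg₂ (· + ·)
    (pairsum_perm (hKD.map _))
    ((hKD.map _).sum_eq)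

-- ===== VERDICT (by name: the statement is the Claim_ definition above) =====
theorem calculate_pair_score_spec : Claim_equal_calculate_pair_score := by
  intro ticket_main draws _
  unfold Spec_calculate_pair_score calculate_pair_score calculate_pair_score_alt
  simp only []
  -- A: fold → sum of counter lookups → sum over the flattened pair list, per draw
  rw [foldl_add_sum]
  simp only [getD_nested_counter, PySem.Dict.getD_empty, zero_add]
  rw [sum_count_comm, sum_flatMap]
  -- B: fold → sum of per-draw terms
  simp only [add_assoc]
  rw [foldl_add_sum, zero_add]
  -- pointwise, per draw
  apply congrArg List.sum
  apply List.map_congr_left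
  intro draw _
  exact draw_eq ticket_main (PySem.Dict.getD (PySem.Dict.ofList draw) "main" [])
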